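-- pv_equiv track=rewrite | github.com/dvc0310/Interview-prep-stuff | anki/07-25-2023.py | triplets_smaller
-- ===== SOURCE A (Python) =====
-- def triplets_smaller(nums, target):
--     lst = []
--     list.sort(nums)
--     for i in range(len(nums)):
--         l = i + 1
--         r = len(nums) - 1
--         while l < r:
--             current_sum = nums[i] + nums[l] + nums[r]
--             if current_sum < target:
--                 for k in range(r, l, -1):
--                     lst.append((i, l, k))
--                 l += 1
--             else:
--                 r -= 1
--     return lst
-- ===== SOURCE B (Python) =====
-- def triplets_smaller(nums, target):
--     # Same in-place sort as A (mutation preserved); plain brute-force triple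
--     # scan replacing the two-pointer walk.
--     nums.sort()
--     n = len(nums)
--     res = []
--     for i in range(n):
--         for l in range(i + 1, n):
--             for k in range(n - 1, l, -1):
--                 if nums[i] + nums[l] + nums[k] < target:
--                     res.append((i, l, k))
--     return res
-- ===== Notes on version B (the rewrite author's own statement) =====
-- stated objective: simpler
-- what changed: Replaces A's two-pointer scan (which batches ranges of k per step) with a plain brute-force triple loop over i < l < k (k descending) testing each sum directly, after the same in-place sort.
import Mathlib
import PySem

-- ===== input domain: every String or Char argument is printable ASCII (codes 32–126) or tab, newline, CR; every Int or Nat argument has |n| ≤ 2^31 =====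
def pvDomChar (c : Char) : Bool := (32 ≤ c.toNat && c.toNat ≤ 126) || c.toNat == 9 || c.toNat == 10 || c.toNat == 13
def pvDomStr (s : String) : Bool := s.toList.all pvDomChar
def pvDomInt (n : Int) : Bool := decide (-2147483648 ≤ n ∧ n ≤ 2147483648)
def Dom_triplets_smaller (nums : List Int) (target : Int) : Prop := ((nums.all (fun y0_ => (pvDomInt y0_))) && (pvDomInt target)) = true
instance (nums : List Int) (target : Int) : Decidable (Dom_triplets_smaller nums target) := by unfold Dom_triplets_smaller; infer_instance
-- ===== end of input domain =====

-- B replaces A's two-pointer scan with a plain brute-force triple loop (same in-place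
-- sort; the equivalence proved here is about the RETURN value — both Pythons sort nums
-- in place identically). Objective: simpler.

-- ===== PORT A =====
-- nums[j] : every index either port reads is in range, so the default 0 is never taken
def tsGet (s : List Int) (j : Int) : Int := PySem.List.pyGetD s j 0

-- the 'while l < r' loop of A, for one fixed i
def tsWhileA (s : List Int) (target i l r : Int) (acc : List (Int × Int × Int)) :
    List (Int × Int × Int) :=
  if l < r then
    if tsGet s i + tsGet s l + tsGet s r < target then
      -- 'for k in range(r, l, -1): lst.append((i, l, k))' then 'l += 1'
      tsWhileA s target i (l + 1) r
        ((PySem.List.pyRange r l (-1)).foldl (fun a k => a ++ [(i, l, k)]) acc)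
    else
      tsWhileA s target i l (r - 1) acc
  else acc
termination_by (r - l).toNat
decreasing_by all_goals omega

def triplets_smaller (nums : List Int) (target : Int) : List (Int × Int × Int) :=
  let s := PySem.List.sorted nums (fun x => x) false
  (PySem.List.pyRange 0 (s.length : Int) 1).foldl
    (fun acc i => tsWhileA s target i (i + 1) ((s.length : Int) - 1) acc) []

-- ===== PORT B =====
def triplets_smaller_alt (nums : List Int) (target : Int) : List (Int × Int × Int) :=
  let s := PySem.List.sorted nums (fun x => x) false
  let n : Int := s.length
  (PySem.List.pyRange 0 n 1).foldl (fun acc i =>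
    (PySem.List.pyRange (i + 1) n 1).foldl (fun acc l =>
      (PySem.List.pyRange (n - 1) l (-1)).foldl (fun acc k =>
        if tsGet s i + tsGet s l + tsGet s k < target then acc ++ [(i, l, k)] else acc)
        acc) acc) []

-- ===== PRECONDITION & SPEC =====
def Spec_triplets_smaller (nums : List Int) (target : Int) (out : List (Int × Int × Int)) : Prop := out = triplets_smaller_alt nums target
instance (nums : List Int) (target : Int) (out : List (Int × Int × Int)) : Decidable (Spec_triplets_smaller nums target out) := by unfold Spec_triplets_smaller; infer_instance

-- ===== CLAIM (what is proved, stated in full; the proofs are below) =====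
def Claim_equal_triplets_smaller : Prop := ∀ (nums : List Int) (target : Int), Dom_triplets_smaller nums target → Spec_triplets_smaller nums target (triplets_smaller nums target)

-- ===== LEMMAS AND PROOFS =====

-- the per-(i,l) contribution of B: all k from n-1 down to l+1 whose sum passes
def tsBInner (s : List Int) (target i l : Int) : List (Int × Int × Int) :=
  (PySem.List.pyRange ((s.length : Int) - 1) l (-1)).flatMap
    (fun k => if tsGet s i + tsGet s l + tsGet s k < target then [(i, l, k)] else [])

-- the per-i contribution starting at middle index l
def tsBFrom (s : List Int) (target i l : Int) : List (Int × Int × Int) :=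
  (PySem.List.pyRange l (s.length : Int) 1).flatMap (tsBInner s target i)

theorem tsGet_mono (s : List Int) (hs : s.Pairwise (· ≤ ·)) (a b : Int)
    (h0 : 0 ≤ a) (hab : a ≤ b) (hb : b < (s.length : Int)) : tsGet s a ≤ tsGet s b := by
  have h0b : 0 ≤ b := le_trans h0 hab
  have ha : a < (s.length : Int) := lt_of_le_of_lt hab hb
  rw [tsGet, tsGet, PySem.List.pyGetD_eq_getElem (xs := s) (d := 0) h0 ha,
      PySem.List.pyGetD_eq_getElem (xs := s) (d := 0) h0b hb]
  rcases lt_or_eq_of_le hab with h | h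
  · exact (List.pairwise_iff_getElem.mp hs) a.toNat b.toNat (by omega) (by omega) (by omega)
  · simp [h]

theorem flatMap_singleton_map {α β : Type} (L : List α) (g : α → β) :
    L.flatMap (fun x => [g x]) = L.map g := by
  induction L with
  | nil => rfl
  | cons y ys ih => simp [ih]

-- generic: a fold that only appends a per-element block is acc ++ flatMap
theorem foldl_emit {α β : Type} (L : List α) (f : List β → α → List β) (E : α → List β)
    (h : ∀ acc x, x ∈ L → f acc x = acc ++ E x) :
    ∀ acc, L.foldl f acc = acc ++ L.flatMap E := by
  induction L with
  | nil => intro acc; simp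
  | cons y ys ih =>
    intro acc
    simp only [List.foldl_cons, List.flatMap_cons]
    rw [h acc y (by simp), ih (fun acc x hx => h acc x (by simp [hx])), List.append_assoc]

-- when the cut invariant and the pass condition hold, B's inner scan at l emits
-- exactly A's descending block (i,l,r), …, (i,l,l+1)
theorem tsBInner_eq_block (s : List Int) (target i l r : Int)
    (hs : s.Pairwise (· ≤ ·)) (h0 : 0 ≤ i) (hil : i < l)
    (hr : r ≤ (s.length : Int) - 1)
    (hcut : ∀ k, r < k → k ≤ (s.length : Int) - 1 →
      ¬ (tsGet s i + tsGet s l + tsGet s k < target))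
    (hpass : tsGet s i + tsGet s l + tsGet s r < target) (hlr : l < r) :
    tsBInner s target i l = (PySem.List.pyRange r l (-1)).map (fun k => (i, l, k)) := by
  have hsplit : PySem.List.pyRange ((s.length : Int) - 1) l (-1) =
      PySem.List.pyRange ((s.length : Int) - 1) r (-1) ++ PySem.List.pyRange r l (-1) := by
    rw [PySem.List.pyRange_neg_one_eq_reverse, PySem.List.pyRange_neg_one_eq_reverse,
        PySem.List.pyRange_neg_one_eq_reverse,
        PySem.List.pyRange_one_append (l + 1) (r + 1) ((s.length : Int) - 1 + 1)
          (by omega) (by omega), List.reverse_append]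
  rw [tsBInner, hsplit, List.flatMap_append]
  have h1 : (PySem.List.pyRange ((s.length : Int) - 1) r (-1)).flatMap
      (fun k => if tsGet s i + tsGet s l + tsGet s k < target then [(i, l, k)] else []) = [] := by
    rw [List.flatMap_eq_nil_iff]
    intro k hk
    rw [PySem.List.mem_pyRange_neg_one] at hk
    simp [hcut k hk.1 (by omega)]
  have h2 : (PySem.List.pyRange r l (-1)).flatMap
      (fun k => if tsGet s i + tsGet s l + tsGet s k < target then [(i, l, k)] else []) =
      (PySem.List.pyRange r l (-1)).map (fun k => (i, l, k)) := by
    rw [List.flatMap_eq_foldl]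
    rw [foldl_emit _ _ (fun k => [(i, l, k)])]
    · simp [flatMap_singleton_map]
    · intro acc k hk
      rw [PySem.List.mem_pyRange_neg_one] at hk
      have : tsGet s k ≤ tsGet s r := tsGet_mono s hs k r (by omega) hk.2 (by omega)
      simp [show tsGet s i + tsGet s l + tsGet s k < target by omega]
  rw [h1, h2, List.nil_append]

-- past the cut, every future middle index contributes nothing
theorem tsBFrom_nil (s : List Int) (target i l r : Int)
    (hs : s.Pairwise (· ≤ ·)) (h0 : 0 ≤ i) (hil : i < l) (hrl : r ≤ l)
    (hcut : ∀ k, r < k → k ≤ (s.length : Int) - 1 →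
      ¬ (tsGet s i + tsGet s l + tsGet s k < target)) :
    tsBFrom s target i l = [] := by
  rw [tsBFrom, List.flatMap_eq_nil_iff]
  intro l' hl'
  rw [PySem.List.mem_pyRange_one] at hl'
  rw [tsBInner, List.flatMap_eq_nil_iff]
  intro k hk
  rw [PySem.List.mem_pyRange_neg_one] at hk
  have hmono : tsGet s l ≤ tsGet s l' :=
    tsGet_mono s hs l l' (by omega) hl'.1 (by omega)
  have := hcut k (by omega) (by omega)
  simp only [ite_eq_right_iff]
  intro hlt
  exact absurd (by omega : tsGet s i + tsGet s l + tsGet s k < target) this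

-- the main invariant: A's while-loop produces exactly B's remaining contributions
theorem tsWhileA_eq (s : List Int) (target i : Int) (hs : s.Pairwise (· ≤ ·))
    (h0 : 0 ≤ i) :
    ∀ (N : ℕ) (l r : Int) (acc : List (Int × Int × Int)), (r - l).toNat ≤ N →
      i < l → r ≤ (s.length : Int) - 1 →
      (∀ k, r < k → k ≤ (s.length : Int) - 1 →
        ¬ (tsGet s i + tsGet s l + tsGet s k < target)) →
      tsWhileA s target i l r acc = acc ++ tsBFrom s target i l := by
  intro N
  induction N with
  | zero =>
    intro l r acc hN hil hr hcut
    have hrl : r ≤ l := by omega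
    rw [tsWhileA, if_neg (by omega), tsBFrom_nil s target i l r hs h0 hil hrl hcut,
        List.append_nil]
  | succ N ih =>
    intro l r acc hN hil hr hcut
    by_cases hlr : l < r
    · rw [tsWhileA, if_pos hlr]
      by_cases hpass : tsGet s i + tsGet s l + tsGet s r < target
      · rw [if_pos hpass]
        have hstep : tsBFrom s target i l = tsBInner s target i l ++ tsBFrom s target i (l + 1) := by
          rw [tsBFrom, tsBFrom, PySem.List.pyRange_one_cons (by omega : l < (s.length : Int)),
              List.flatMap_cons]
        have hcut' : ∀ k, r < k → k ≤ (s.length : Int) - 1 →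
            ¬ (tsGet s i + tsGet s (l + 1) + tsGet s k < target) := by
          intro k hk1 hk2
          have hmono : tsGet s l ≤ tsGet s (l + 1) :=
            tsGet_mono s hs l (l + 1) (by omega) (by omega) (by omega)
          have := hcut k hk1 hk2
          omega
        rw [ih (l + 1) r _ (by omega) (by omega) hr hcut',
            PySem.List.foldl_append_eq_flatMap, hstep,
            tsBInner_eq_block s target i l r hs h0 hil hr hcut hpass hlr]
        simp [flatMap_singleton_map, List.append_assoc]
      · rw [if_neg hpass]
        have hcut' : ∀ k, r - 1 < k → k ≤ (s.length : Int) - 1 →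
            ¬ (tsGet s i + tsGet s l + tsGet s k < target) := by
          intro k hk1 hk2
          rcases eq_or_lt_of_le (by omega : r ≤ k) with h | h
          · rw [← h]; exact hpass
          · exact hcut k h hk2
        exact ih l (r - 1) acc (by omega) hil (by omega) hcut'
    · rw [tsWhileA, if_neg hlr,
          tsBFrom_nil s target i l r hs h0 hil (by omega) hcut, List.append_nil]

-- B's middle loop at i computes tsBFrom from i+1
theorem tsB_per_i (s : List Int) (target i : Int) (acc : List (Int × Int × Int)) :
    (PySem.List.pyRange (i + 1) (s.length : Int) 1).foldl (fun acc l =>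
      (PySem.List.pyRange ((s.length : Int) - 1) l (-1)).foldl (fun acc k =>
        if tsGet s i + tsGet s l + tsGet s k < target then acc ++ [(i, l, k)] else acc)
        acc) acc = acc ++ tsBFrom s target i (i + 1) := by
  rw [tsBFrom, foldl_emit _ _ (tsBInner s target i)]
  intro a l _
  rw [tsBInner, foldl_emit _ _
    (fun k => if tsGet s i + tsGet s l + tsGet s k < target then [(i, l, k)] else [])]
  intro a' k _
  split <;> simp

-- ===== VERDICT (by name: the statement is the Claim_ definition above) =====
theorem triplets_smaller_spec : Claim_equal_triplets_smaller := by
  intro nums target _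
  unfold Spec_triplets_smaller triplets_smaller triplets_smaller_alt
  set s := PySem.List.sorted nums (fun x => x) false with hsdef
  have hs : s.Pairwise (· ≤ ·) := by
    have := PySem.List.sorted_pairwise (xs := nums) (key := fun x => x)
    simpa using this
  simp only
  rw [foldl_emit _ _ (fun i => tsBFrom s target i (i + 1)), 
      foldl_emit _ _ (fun i => tsBFrom s target i (i + 1))]
  · intro acc i hi
    rw [PySem.List.mem_pyRange_one] at hi
    exact tsB_per_i s target i acc
  · intro acc i hi
    rw [PySem.List.mem_pyRange_one] at hi
    exact tsWhileA_eq s target i hs hi.1 ((s.length : Int) - 1 - (i + 1)).toNat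
      (i + 1) ((s.length : Int) - 1) acc (le_refl _) (by omega) (by omega)
      (by intro k hk1 hk2; omega)
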